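-- pv_equiv track=rewrite | github.com/snefrukai/15-112 | hw3.py | topScorer
-- ===== SOURCE A (Python) =====
-- def score_total_get(str):
--     score = 0
--     for val in str.split(","):
--         val = val.strip()
--         if val.isalpha(): name = val
--         elif val.isdigit(): score += int(val)
--     return name, score
--
-- def topScorer(str):
--     if str == "": return None
--
--     winner = ""
--     score_max = 0
--     for line in str.splitlines():
--         name, score = score_total_get(line)
--         if score > score_max:  # save max
--             winner, score_max = name, score
--         elif score == score_max:
--             winner += "," + name if winner != '' else name
--     return winner
-- ===== SOURCE B (Python) =====
-- def score_total_get(str):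
--     score = 0
--     for val in str.split(","):
--         val = val.strip()
--         if val.isalpha(): name = val
--         elif val.isdigit(): score += int(val)
--     return name, score
--
-- def topScorer(str):
--     if str == "": return None
--     pairs = [score_total_get(line) for line in str.splitlines()]
--     best = max(score for _, score in pairs)
--     return ",".join(name for name, score in pairs if score == best)
-- ===== Notes on version B (the rewrite author's own statement) =====
-- stated objective: idiomatic
-- what changed: Replaces the single running-max loop with running tie-list rebuilding by a parse-all / max() / join-filter decomposition (correct because scores are non-negative, so the running max starting at 0 converges to the global max).
import Mathlib
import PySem

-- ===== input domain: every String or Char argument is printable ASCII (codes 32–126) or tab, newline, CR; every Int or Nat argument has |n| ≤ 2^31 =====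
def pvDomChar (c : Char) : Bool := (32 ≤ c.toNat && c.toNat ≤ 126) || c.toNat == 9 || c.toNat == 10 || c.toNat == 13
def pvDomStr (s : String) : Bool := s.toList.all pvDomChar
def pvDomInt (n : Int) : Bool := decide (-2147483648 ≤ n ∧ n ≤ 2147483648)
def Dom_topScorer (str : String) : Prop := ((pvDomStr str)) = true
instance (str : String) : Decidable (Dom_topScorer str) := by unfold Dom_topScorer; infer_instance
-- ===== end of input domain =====

-- B replaces A's single running-max pass (with in-loop tie-string rebuilding) by the idiomatic
-- parse-all / max() / join-filter decomposition; equal because scores are sums of digits, hence ≥ 0.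

-- ===== PORT A =====
-- s.split(",") : the separator is nonempty, so Chars.splitOn is exactly Python's split
def pySplitComma (s : String) : List String :=
  (PySem.Chars.splitOn s.toList [',']).map String.ofList

-- shared helper score_total_get (B reuses it unchanged); returns none exactly where Python
-- raises UnboundLocalError (no alphabetic token, so `name` is never bound).
-- int(val) is ported as (ofStr? val).getD 0 — exact, since int(val) succeeds whenever
-- val.isdigit() holds on the ASCII domain.
def stgStep (acc : Option String × Int) (val : String) : Option String × Int :=
  let v := PySem.Str.strip val
  if PySem.Str.strIsalpha v = true then (some v, acc.2)
  else if PySem.Str.strIsdigit v = true then (acc.1, acc.2 + (PySem.Int.ofStr? v).getD 0)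
  else acc

def scoreTotalGet (s : String) : Option (String × Int) :=
  match (pySplitComma s).foldl stgStep (none, 0) with
  | (none, _) => none
  | (some n, score) => some (n, score)

def topScorer (str : String) : Option String :=
  if str = "" then none
  else
    match (PySem.Str.splitlines str).foldl
        (fun acc line =>
          match acc with
          | none => none
          | some (winner, scoreMax) =>
            match scoreTotalGet line with
            | none => none
            | some (name, score) =>
              if scoreMax < score then some (name, score)
              else if score = scoreMax then
                some ((if winner ≠ "" then winner ++ "," ++ name else name), scoreMax)
              else some (winner, scoreMax))
        (some ("", 0)) with
    | none => none
    | some (w, _) => some w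

-- ===== PORT B =====
def topScorer_alt (str : String) : Option String :=
  if str = "" then none
  else
    match (PySem.Str.splitlines str).mapM scoreTotalGet with
    | none => none      -- a line raised UnboundLocalError (outside Pre_)
    | some pairs =>
      match PySem.List.max? (pairs.map (·.2)) (fun x => x) with
      | none => none    -- max() on an empty sequence (unreachable: str ≠ "")
      | some best =>
        some (PySem.Str.join "," ((pairs.filter (fun p => p.2 == best)).map (·.1)))

-- ===== PRECONDITION & SPEC =====
-- Pre_ excludes exactly the inputs on which A raises UnboundLocalError: a line with no
-- comma-separated token that strips to an alphabetic word leaves `name` unbound.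
def Pre_topScorer (str : String) : Prop :=
  ∀ line ∈ PySem.Str.splitlines str,
    ∃ cs ∈ PySem.Chars.splitOn line.toList [','],
      PySem.Chars.strIsalpha (PySem.Chars.strip cs) = true
instance (str : String) : Decidable (Pre_topScorer str) := by unfold Pre_topScorer; infer_instance

def pvWitness_topScorer : String := "amy, 3\nbob,2,1\ncal , 3"

def Spec_topScorer (str : String) (out : Option String) : Prop := out = topScorer_alt str
instance (str : String) (out : Option String) : Decidable (Spec_topScorer str out) := by unfold Spec_topScorer; infer_instance

-- ===== CLAIM (what is proved, stated in full; the proofs are below) =====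
def Claim_equal_topScorer : Prop := ∀ (str : String), Dom_topScorer str → Pre_topScorer str → Spec_topScorer str (topScorer str)

-- ===== LEMMAS AND PROOFS =====

-- the pure per-line step of A's loop, on already-parsed (name, score) pairs
def catName (w n : String) : String := if w ≠ "" then w ++ "," ++ n else n
def stepP (acc : String × Int) (p : String × Int) : String × Int :=
  if acc.2 < p.2 then p
  else if p.2 = acc.2 then (catName acc.1 p.1, acc.2)
  else acc
def foldCat (w : String) (ns : List String) : String := ns.foldl catName w

theorem le_foldl_max_init (m : Int) (l : List Int) : m ≤ l.foldl max m := by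
  induction l generalizing m with
  | nil => simp
  | cons x t ih => exact le_trans (le_max_left m x) (ih _)

theorem foldP_char (ps : List (String × Int)) : ∀ (w : String) (m : Int),
    ps.foldl stepP (w, m) =
      (foldCat (if (ps.map (·.2)).foldl max m = m then w else "")
        ((ps.filter (fun p => p.2 == (ps.map (·.2)).foldl max m)).map (·.1)),
       (ps.map (·.2)).foldl max m) := by
  induction ps with
  | nil => intro w m; simp [foldCat]
  | cons p t ih =>
    intro w m
    obtain ⟨n, s⟩ := p
    simp only [List.foldl_cons, List.map_cons, List.filter_cons]
    by_cases h1 : m < s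
    · have hmax : max m s = s := max_eq_right h1.le
      have hle : s ≤ (t.map (·.2)).foldl max s := le_foldl_max_init _ _
      rw [show stepP (w, m) (n, s) = (n, s) by simp [stepP, h1], ih n s]
      simp only [hmax]
      have hMm : ¬ (t.map (·.2)).foldl max s = m := by omega
      rw [if_neg hMm]
      by_cases h2 : (t.map (·.2)).foldl max s = s
      · simp only [h2, if_pos rfl, beq_self_eq_true, List.map_cons]
        simp [foldCat, catName]
      · have hs : ¬ (((n, s).2 == (t.map (·.2)).foldl max s) = true) := by
          simp only [beq_iff_eq]; exact fun h => h2 h.symm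
        simp [h2, hs]
    · by_cases h2 : s = m
      · have hstep : stepP (w, m) (n, s) = (catName w n, m) := by simp [stepP, h1, h2]
        rw [hstep, ih (catName w n) m]
        simp only [h2, max_self]
        by_cases h3 : (t.map (·.2)).foldl max m = m
        · simp only [h3, if_pos rfl, beq_self_eq_true, List.map_cons]
          simp [foldCat]
        · have hs : ¬ ((m == (t.map (·.2)).foldl max m) = true) := by
            simp only [beq_iff_eq]; exact fun h => h3 h.symm
          simp [h3, hs]
      · have h4 : s < m := by omega
        have hmax : max m s = m := max_eq_left h4.le
        have hstep : stepP (w, m) (n, s) = (w, m) := by simp [stepP, h1, h2]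
        rw [hstep, ih w m]
        simp only [hmax]
        have hle : m ≤ (t.map (·.2)).foldl max m := le_foldl_max_init _ _
        have hs : ¬ (((n, s).2 == (t.map (·.2)).foldl max m) = true) := by
          simp only [beq_iff_eq]; omega
        simp [hs]

-- int(v) for a digit-only v is ≥ 0
theorem opt_nat_nonneg (o : Option Nat) :
    0 ≤ (Option.map (fun n : Int => n) (o.bind (fun a => some ((a : Int))))).getD 0 := by
  cases o <;> simp

theorem ofChars?_digits_nonneg (cs : List Char) (h : PySem.Chars.strIsdigit cs = true) :
    0 ≤ (PySem.Int.ofChars? cs).getD 0 := by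
  simp only [PySem.Chars.strIsdigit, Bool.and_eq_true, List.all_eq_true, List.isEmpty_iff,
    Bool.not_eq_true'] at h
  obtain ⟨hne, hall⟩ := h
  have hnsp : ∀ c ∈ cs, PySem.Int.isIntSpace c = false := by
    intro c hc
    have hd := hall c hc
    simp only [PySem.Chars.isdigit, Bool.and_eq_true, decide_eq_true_eq] at hd
    obtain ⟨h0, h9⟩ := hd
    simp only [PySem.Int.isIntSpace, Bool.or_eq_false_iff, decide_eq_false_iff_not]
    refine ⟨⟨⟨⟨⟨?_, ?_⟩, ?_⟩, ?_⟩, ?_⟩, ?_⟩ <;> (intro h; subst h; revert h0; decide)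
  have hdw : cs.dropWhile PySem.Int.isIntSpace = cs :=
    List.dropWhile_eq_self_iff.mpr (by
      intro hl
      simp [hnsp _ (List.getElem_mem hl)])
  have hdw2 : cs.reverse.dropWhile PySem.Int.isIntSpace = cs.reverse :=
    List.dropWhile_eq_self_iff.mpr (by
      intro hl
      have hm : cs.reverse[0] ∈ cs := (List.mem_reverse).mp (List.getElem_mem hl)
      simp only [List.getElem_reverse] at hm ⊢
      simp only [Nat.sub_zero] at hm
      simp [hnsp _ hm])
  rw [PySem.Int.ofChars?]
  simp only [hdw, hdw2, List.reverse_reverse]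
  match hcs : cs, hne with
  | c :: rest, _ =>
    have hc : PySem.Chars.isdigit c = true := hall c (by simp)
    have hcne1 : c ≠ '-' := by
      intro h; subst h; simp [PySem.Chars.isdigit] at hc
    have hcne2 : c ≠ '+' := by
      intro h; subst h; simp [PySem.Chars.isdigit] at hc
    split
    · simp_all
    · simp_all
    · exact opt_nat_nonneg _


-- facts about score_total_get's loop state: score stays ≥ 0, a bound name is a nonempty word
theorem alpha_ne_empty (v : String) (h : PySem.Str.strIsalpha v = true) : v ≠ "" := by
  intro he; subst he; simp [PySem.Str.strIsalpha, PySem.Chars.strIsalpha] at h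

theorem stgFold_nonneg (vals : List String) :
    ∀ (a : Option String) (b : Int), 0 ≤ b →
    0 ≤ (vals.foldl stgStep (a, b)).2 := by
  induction vals with
  | nil => intro a b hb; exact hb
  | cons val t ih =>
    intro a b hb
    rw [List.foldl_cons]
    simp only [stgStep]
    by_cases h1 : PySem.Str.strIsalpha (PySem.Str.strip val) = true
    · simp only [h1, if_pos]; exact ih _ _ hb
    · by_cases h2 : PySem.Str.strIsdigit (PySem.Str.strip val) = true
      · simp only [h1, h2, if_neg, if_pos]
        refine ih _ _ ?_
        have : 0 ≤ (PySem.Int.ofStr? (PySem.Str.strip val)).getD 0 := by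
          have hd : PySem.Chars.strIsdigit (PySem.Str.strip val).toList = true := by
            rw [← PySem.Str.strIsdigit_eq]; exact h2
          exact ofChars?_digits_nonneg _ hd
        omega
      · simp only [h1, h2, if_neg]; exact ih _ _ hb

theorem stgFold_name (vals : List String) :
    ∀ (a : Option String) (b : Int) (n : String),
    (vals.foldl stgStep (a, b)).1 = some n → a = some n ∨ n ≠ "" := by
  induction vals with
  | nil => intro a b n h; exact Or.inl h
  | cons val t ih =>
    intro a b n h
    rw [List.foldl_cons] at h
    simp only [stgStep] at h
    by_cases h1 : PySem.Str.strIsalpha (PySem.Str.strip val) = true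
    · simp only [h1, if_pos] at h
      rcases ih _ _ _ h with h2 | h2
      · right
        have := alpha_ne_empty _ h1
        simp only [Option.some.injEq] at h2
        rw [← h2]; exact this
      · exact Or.inr h2
    · by_cases h2 : PySem.Str.strIsdigit (PySem.Str.strip val) = true
      · simp only [h1, h2, if_neg, if_pos] at h; exact ih _ _ _ h
      · simp only [h1, h2, if_neg] at h; exact ih _ _ _ h

theorem stgFold_isSome (vals : List String) :
    ∀ (a : Option String) (b : Int),
    ((∃ v ∈ vals, PySem.Str.strIsalpha (PySem.Str.strip v) = true) ∨ a.isSome = true) →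
    (vals.foldl stgStep (a, b)).1.isSome = true := by
  induction vals with
  | nil =>
    intro a b h
    rcases h with ⟨v, hv, _⟩ | h
    · exact absurd hv (List.not_mem_nil)
    · exact h
  | cons val t ih =>
    intro a b h
    rw [List.foldl_cons]
    simp only [stgStep]
    by_cases h1 : PySem.Str.strIsalpha (PySem.Str.strip val) = true
    · simp only [h1, if_pos]; exact ih _ _ (Or.inr rfl)
    · have ht : (∃ v ∈ t, PySem.Str.strIsalpha (PySem.Str.strip v) = true) ∨ a.isSome = true := by
        rcases h with ⟨v, hv, hva⟩ | h
        · rcases List.mem_cons.mp hv with h2 | h2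
          · subst h2; exact absurd hva h1
          · exact Or.inl ⟨v, h2, hva⟩
        · exact Or.inr h
      by_cases h2 : PySem.Str.strIsdigit (PySem.Str.strip val) = true
      · simp only [h1, h2, if_neg, if_pos]; exact ih _ _ ht
      · simp only [h1, h2, if_neg]; exact ih _ _ ht

theorem stg_facts (s : String) (n : String) (k : Int)
    (h : scoreTotalGet s = some (n, k)) : 0 ≤ k ∧ n ≠ "" := by
  unfold scoreTotalGet at h
  rcases hr : (pySplitComma s).foldl stgStep (none, 0) with ⟨a, b⟩
  rw [hr] at h
  cases a with
  | none => simp at h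
  | some m =>
    simp only [Option.some.injEq, Prod.mk.injEq] at h
    obtain ⟨h1, h2⟩ := h
    constructor
    · have hnn := stgFold_nonneg (pySplitComma s) none 0 le_rfl
      rw [hr] at hnn
      rw [← h2]; exact hnn
    · rcases stgFold_name (pySplitComma s) none 0 m (by rw [hr]) with h3 | h3
      · simp at h3
      · rw [← h1]; exact h3

theorem stg_some_of_pre (s : String)
    (h : ∃ cs ∈ PySem.Chars.splitOn s.toList [','],
        PySem.Chars.strIsalpha (PySem.Chars.strip cs) = true) :
    (scoreTotalGet s).isSome = true := by
  obtain ⟨cs, hcs, hal⟩ := h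
  have hv : ∃ v ∈ pySplitComma s, PySem.Str.strIsalpha (PySem.Str.strip v) = true := by
    refine ⟨String.ofList cs, List.mem_map_of_mem hcs, ?_⟩
    rw [PySem.Str.strIsalpha_eq, PySem.Str.toList_strip, String.toList_ofList]
    exact hal
  have hS := stgFold_isSome (pySplitComma s) none 0 (Or.inl hv)
  unfold scoreTotalGet
  rcases hr : (pySplitComma s).foldl stgStep (none, 0) with ⟨a, b⟩
  rw [hr] at hS
  cases a with
  | none => simp at hS
  | some m => rfl

-- splitlines of a nonempty string is nonempty
theorem go_cons_eq (isB : Char → Bool) (c : Char) (rest cur : List Char)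
    (acc : List (List Char))
    (h : ∀ (rest1 : List Char), c = '\x0d' → rest = '\n' :: rest1 → False) :
    PySem.Chars.splitlines.go isB (c :: rest) cur acc
      = if isB c then PySem.Chars.splitlines.go isB rest [] (cur.reverse :: acc)
        else PySem.Chars.splitlines.go isB rest (c :: cur) acc := by
  rw [PySem.Chars.splitlines.go.eq_def]
  split
  · rename_i heq; cases heq
  · rename_i rest' heq
    injection heq with h1 h2
    exact (h rest' h1 h2).elim
  · rename_i c' rest' heq
    injection heq with h1 h2
    subst h1; subst h2; rfl

theorem go_len (isB : Char → Bool) (s cur : List Char) (acc : List (List Char)) :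
    acc.length ≤ (PySem.Chars.splitlines.go isB s cur acc).length ∧
      (s ≠ [] ∨ cur ≠ [] → acc.length + 1 ≤ (PySem.Chars.splitlines.go isB s cur acc).length) := by
  induction s, cur, acc using PySem.Chars.splitlines.go.induct isB with
  | case1 cur acc hcur =>
    have hc : cur = [] := List.isEmpty_iff.mp hcur
    rw [PySem.Chars.splitlines.go, if_pos hcur]
    refine ⟨by simp, fun h => ?_⟩
    rcases h with h | h
    · exact absurd rfl h
    · exact absurd hc h
  | case2 cur acc hcur =>
    rw [PySem.Chars.splitlines.go, if_neg hcur]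
    exact ⟨by simp, fun _ => by simp⟩
  | case3 rest cur acc ih =>
    rw [show PySem.Chars.splitlines.go isB ('\x0d' :: '\n' :: rest) cur acc
        = PySem.Chars.splitlines.go isB rest [] (cur.reverse :: acc) from rfl]
    have h1 := ih.1
    simp only [List.length_cons] at h1
    exact ⟨by omega, fun _ => by omega⟩
  | case4 c rest cur acc hne hB ih =>
    rw [go_cons_eq isB c rest cur acc hne, if_pos hB]
    have h1 := ih.1
    simp only [List.length_cons] at h1
    exact ⟨by omega, fun _ => by omega⟩
  | case5 c rest cur acc hne hB ih =>
    rw [go_cons_eq isB c rest cur acc hne, if_neg (by simp [hB])]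
    have h2 := ih.2 (Or.inr (by simp))
    exact ⟨by omega, fun _ => by omega⟩

def pyIsBreak (c : Char) : Bool :=
  let n := c.toNat
  decide (n = 10) || decide (n = 13) || decide (n = 11) || decide (n = 12) || decide (n = 28) ||
    decide (n = 29) || decide (n = 30) || decide (n = 133) || decide (n = 8232) || decide (n = 8233)

theorem chars_splitlines_eq_go (cs : List Char) :
    PySem.Chars.splitlines cs = PySem.Chars.splitlines.go pyIsBreak cs [] [] := rfl

theorem splitlines_ne_nil (s : String) (h : s ≠ "") : PySem.Str.splitlines s ≠ [] := by
  have hcs : s.toList ≠ [] := fun hnil => h (String.toList_inj.mp (by rw [hnil]; rfl))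
  rw [PySem.Str.splitlines]
  intro hmap
  have hgo := List.map_eq_nil_iff.mp hmap
  rw [chars_splitlines_eq_go] at hgo
  have hlen := (go_len pyIsBreak s.toList [] []).2 (Or.inl hcs)
  rw [hgo] at hlen
  simp at hlen

-- ",".join equals A's comma-concatenation fold, on nonempty pieces
theorem foldCat_toList (ns : List String) :
    ∀ w : String, w ≠ "" →
    (foldCat w ns).toList = w.toList ++ (ns.map (fun n => ',' :: n.toList)).flatten := by
  induction ns with
  | nil => intro w _; simp [foldCat]
  | cons n t ih =>
    intro w hw
    have hcat : catName w n = w ++ "," ++ n := by simp [catName, hw]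
    have hne : w ++ "," ++ n ≠ "" := by
      intro he
      have := congrArg String.toList he
      simp [String.toList_append] at this
    rw [show foldCat w (n :: t) = foldCat (catName w n) t from rfl, hcat, ih _ hne]
    simp [String.toList_append]

theorem intercalate_cons_comma (sep a b : List Char) (l : List (List Char)) :
    List.intercalate sep (a :: b :: l) = a ++ sep ++ List.intercalate sep (b :: l) := by
  simp [List.intercalate, List.intersperse]

theorem intercalate_comma (t : List String) :
    ∀ n : String, List.intercalate [','] (n.toList :: t.map String.toList)
      = n.toList ++ (t.map (fun x => ',' :: x.toList)).flatten := by
  induction t with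
  | nil => intro n; simp [List.intercalate, List.intersperse]
  | cons m t2 ih =>
    intro n
    rw [List.map_cons, intercalate_cons_comma, ih m]
    simp

theorem join_eq_foldCat (ns : List String) (h : ∀ n ∈ ns, n ≠ "") :
    PySem.Str.join "," ns = foldCat "" ns := by
  cases ns with
  | nil => rfl
  | cons n t =>
    have hn : n ≠ "" := h n (List.mem_cons_self)
    apply String.toList_inj.mp
    have h1 : foldCat "" (n :: t) = foldCat n t := by
      simp [foldCat, catName]
    rw [h1, foldCat_toList t n hn]
    rw [PySem.Str.join]
    simp only [PySem.Chars.join, String.toList_ofList, List.map_cons]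
    exact intercalate_comma t n

-- A's per-line loop body lifted to already-parsed pairs
theorem foldA_eq (lines : List String) :
    ∀ (ps : List (String × Int)) (acc : String × Int),
      lines.mapM scoreTotalGet = some ps →
      lines.foldl
        (fun acc line =>
          match acc with
          | none => none
          | some (winner, scoreMax) =>
            match scoreTotalGet line with
            | none => none
            | some (name, score) =>
              if scoreMax < score then some (name, score)
              else if score = scoreMax then
                some ((if winner ≠ "" then winner ++ "," ++ name else name), scoreMax)
              else some (winner, scoreMax))
        (some acc) = some (ps.foldl stepP acc) := by
  induction lines with
  | nil => intro ps acc h; simp only [List.mapM_nil, pure, Option.some.injEq] at h; subst h; rfl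
  | cons l t ih =>
    intro ps acc h
    rw [List.mapM_cons] at h
    cases hl : scoreTotalGet l with
    | none => simp [hl, bind, Option.bind] at h
    | some p =>
      cases ht : t.mapM scoreTotalGet with
      | none => simp [hl, ht, bind, Option.bind] at h
      | some ps' =>
        simp only [hl, ht, bind, Option.bind, pure, Option.some.injEq] at h
        subst h
        obtain ⟨n0, s0⟩ := p
        obtain ⟨w0, m0⟩ := acc
        rw [List.foldl_cons, List.foldl_cons, ← ih ps' (stepP (w0, m0) (n0, s0)) ht]
        congr 1
        simp only [hl, stepP, catName]
        split_ifs <;> simp_all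

theorem mapM_stg_facts (lines : List String) :
    ∀ ps, lines.mapM scoreTotalGet = some ps → ∀ p ∈ ps, 0 ≤ p.2 ∧ p.1 ≠ "" := by
  induction lines with
  | nil => intro ps h; simp only [List.mapM_nil, pure, Option.some.injEq] at h; subst h; simp
  | cons l t ih =>
    intro ps h
    rw [List.mapM_cons] at h
    cases hl : scoreTotalGet l with
    | none => simp [hl, bind, Option.bind] at h
    | some p =>
      cases ht : t.mapM scoreTotalGet with
      | none => simp [hl, ht, bind, Option.bind] at h
      | some ps' =>
        simp only [hl, ht, bind, Option.bind, pure, Option.some.injEq] at h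
        subst h
        intro q hq
        rcases List.mem_cons.mp hq with h1 | h1
        · subst h1; exact stg_facts l q.1 q.2 (by rw [hl])
        · exact ih ps' ht q h1

theorem mapM_stg_ne_nil (l : String) (t : List String) (ps : List (String × Int))
    (h : (l :: t).mapM scoreTotalGet = some ps) : ps ≠ [] := by
  rw [List.mapM_cons] at h
  cases hl : scoreTotalGet l with
  | none => simp [hl, bind, Option.bind] at h
  | some p =>
    cases ht : t.mapM scoreTotalGet with
    | none => simp [hl, ht, bind, Option.bind] at h
    | some ps' =>
      simp only [hl, ht, bind, Option.bind, pure, Option.some.injEq] at h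
      subst h; simp

theorem mapM_stg_isSome (lines : List String)
    (h : ∀ line ∈ lines, (scoreTotalGet line).isSome = true) :
    ∃ ps, lines.mapM scoreTotalGet = some ps := by
  induction lines with
  | nil => exact ⟨[], rfl⟩
  | cons l t ih =>
    obtain ⟨ps', ht⟩ := ih (fun x hx => h x (List.mem_cons_of_mem _ hx))
    obtain ⟨p, hp⟩ := Option.isSome_iff_exists.mp (h l (List.mem_cons_self))
    exact ⟨p :: ps', by rw [List.mapM_cons]; simp [hp, ht, bind, Option.bind, pure]⟩

-- ===== VERDICT (by name: the statement is the Claim_ definition above) =====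
theorem topScorer_spec : Claim_equal_topScorer := by
  intro str _ hpre
  unfold Spec_topScorer topScorer topScorer_alt
  by_cases hs : str = ""
  · simp [hs]
  · rw [if_neg hs, if_neg hs]
    have hlines : PySem.Str.splitlines str ≠ [] := splitlines_ne_nil str hs
    have hsome : ∀ line ∈ PySem.Str.splitlines str, (scoreTotalGet line).isSome = true :=
      fun line hl => stg_some_of_pre line (hpre line hl)
    obtain ⟨ps, hps⟩ := mapM_stg_isSome _ hsome
    rw [hps, foldA_eq _ ps ("", 0) hps]
    obtain ⟨l, lt, hL⟩ := List.exists_cons_of_ne_nil hlines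
    have hpsne : ps ≠ [] := mapM_stg_ne_nil l lt ps (by rw [← hL]; exact hps)
    obtain ⟨p, pt, hP⟩ := List.exists_cons_of_ne_nil hpsne
    subst hP
    have hfacts := mapM_stg_facts _ _ hps
    have hp2 : (0:Int) ≤ p.2 := (hfacts p (List.mem_cons_self)).1
    rw [foldP_char, ite_self]
    simp only [List.map_cons]
    rw [PySem.List.max?_id_cons]
    have hbest : List.foldl max 0 (p.2 :: pt.map (fun x => x.2))
        = List.foldl max p.2 (pt.map (fun x => x.2)) := by
      rw [List.foldl_cons, max_eq_right hp2]
    rw [hbest]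
    have hne : ∀ n ∈ (((p :: pt).filter
        (fun q => q.2 == List.foldl max p.2 (pt.map (fun x => x.2)))).map (fun x => x.1)),
        n ≠ "" := by
      intro n hn
      obtain ⟨q, hq1, hq2⟩ := List.mem_map.mp hn
      have hqm : q ∈ p :: pt := List.mem_of_mem_filter hq1
      rw [← hq2]
      exact (hfacts q hqm).2
    exact congrArg some (join_eq_foldCat _ hne).symm
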